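-- pv_equiv track=rewrite | github.com/xuzhougeng/myscripts | misc/splite_super_big_genome.py | create_genome_split_position
-- ===== SOURCE A (Python) =====
-- def create_genome_split_position(chrom_size, n_regions, max_chrom_size):
--     result = []
--     for chrom, size in chrom_size.items():
--         if size <= max_chrom_size:
--             # 染色体长度小于等于 max_chrom_size，直接输出
--             result.append((chrom, 0, size, chrom ))
--         else:
--             # 需要分割
--             splits = n_regions.get(chrom, [])
--             start_pos = 0
--             end_pos = 0
--             chrom_counter = 1
--             for i, split in enumerate(splits):
--                 # 尽可能在 N 区域分割，同时确保分割后的长度不超过 max_chrom_size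
--                 next_split_start = size if i + 1 == len(splits) else splits[i + 1][0]
--                 if split[0] - start_pos <= max_chrom_size and next_split_start - start_pos > max_chrom_size:
--                     end_pos = split[0]
--                     result.append((chrom, start_pos, end_pos, chrom + f"00{chrom_counter}"))
--                     start_pos = split[1]  # 下一个分割开始位置是当前 'N' 区域的结束位置
--                     chrom_counter += 1
--             # 添加最后一个分割，如果有的话
--             if start_pos < size:
--                 result.append((chrom, start_pos, size, chrom + f"00{chrom_counter}"))
--     return result
-- ===== SOURCE B (Python) =====
-- def create_genome_split_position(chrom_size, n_regions, max_chrom_size):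
--     # Candidate-tracking single scan: no i+1 lookahead, remember the last feasible gap
--     # and commit a cut only when the next gap start would overflow the limit.
--     result = []
--     for chrom, size in chrom_size.items():
--         if size <= max_chrom_size:
--             result.append((chrom, 0, size, chrom))
--             continue
--         start_pos = 0
--         chrom_counter = 1
--         cand = None
--         for split in n_regions.get(chrom, []):
--             if split[0] - start_pos > max_chrom_size:
--                 if cand is not None:
--                     result.append((chrom, start_pos, cand[0], chrom + f"00{chrom_counter}"))
--                     start_pos = cand[1]
--                     chrom_counter += 1
--                     cand = split if split[0] - start_pos <= max_chrom_size else None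
--             else:
--                 cand = split
--         if cand is not None and size - start_pos > max_chrom_size:
--             result.append((chrom, start_pos, cand[0], chrom + f"00{chrom_counter}"))
--             start_pos = cand[1]
--             chrom_counter += 1
--         if start_pos < size:
--             result.append((chrom, start_pos, size, chrom + f"00{chrom_counter}"))
--     return result
-- ===== Notes on version B (the rewrite author's own statement) =====
-- stated objective: alternative
-- what changed: Replaces A's enumerate loop with an i+1 peek-ahead at splits[i+1] by a single forward scan that remembers the last feasible N-gap as a cut candidate and commits the cut (plus a post-loop candidate commit before the tail region) only when the next gap start would overflow start_pos+max_chrom_size.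
import Mathlib
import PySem

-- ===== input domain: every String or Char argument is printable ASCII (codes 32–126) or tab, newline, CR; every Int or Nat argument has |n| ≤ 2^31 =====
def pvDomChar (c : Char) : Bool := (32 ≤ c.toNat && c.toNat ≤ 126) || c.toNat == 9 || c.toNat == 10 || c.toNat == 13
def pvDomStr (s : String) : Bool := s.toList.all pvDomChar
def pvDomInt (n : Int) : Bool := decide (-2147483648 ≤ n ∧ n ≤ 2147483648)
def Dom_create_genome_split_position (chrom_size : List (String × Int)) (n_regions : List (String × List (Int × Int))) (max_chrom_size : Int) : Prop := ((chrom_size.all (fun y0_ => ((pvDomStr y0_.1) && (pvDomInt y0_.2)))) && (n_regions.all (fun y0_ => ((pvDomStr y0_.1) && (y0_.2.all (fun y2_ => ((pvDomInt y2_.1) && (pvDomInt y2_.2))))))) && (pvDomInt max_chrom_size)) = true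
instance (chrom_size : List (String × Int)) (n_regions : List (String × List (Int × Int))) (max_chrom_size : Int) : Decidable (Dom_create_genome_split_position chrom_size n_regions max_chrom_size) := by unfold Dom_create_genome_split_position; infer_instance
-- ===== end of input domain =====

-- B replaces A's peek-ahead at splits[i+1] by a single scan that remembers the last feasible
-- gap as a cut candidate and commits it when the next gap start would overflow the limit
-- (objective: alternative decomposition, same cost).

-- name suffix chrom + f"00{counter}" (identical in both Pythons)
def pvName (chrom : String) (c : Int) : String := chrom ++ "00" ++ PySem.Int.toStr c

-- ===== PORT A =====
-- A's inner 'for i, split in enumerate(splits)' ported as a recursion carrying the index i and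
-- the remaining suffix; the lookahead splits[i+1] is read from the full list via pyGetD (always
-- in range when used, since the branch taken at i+1 == len(splits) supplies 'size' instead).
def pvALoop (chrom : String) (size max_chrom_size : Int) (splits : List (Int × Int)) :
    Nat → List (Int × Int) → List (String × Int × Int × String) × Int × Int →
    List (String × Int × Int × String) × Int × Int
  | _, [], st => st
  | i, split :: rest, st =>
      let next_split_start : Int :=
        if (i : Int) + 1 = PySem.List.len splits then size
        else (PySem.List.pyGetD splits ((i : Int) + 1) (0, 0)).1
      if split.1 - st.2.1 ≤ max_chrom_size ∧ next_split_start - st.2.1 > max_chrom_size then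
        pvALoop chrom size max_chrom_size splits (i + 1) rest
          (st.1 ++ [(chrom, st.2.1, split.1, pvName chrom st.2.2)], split.2, st.2.2 + 1)
      else
        pvALoop chrom size max_chrom_size splits (i + 1) rest st

def create_genome_split_position (chrom_size : List (String × Int)) (n_regions : List (String × List (Int × Int))) (max_chrom_size : Int) : List (String × Int × Int × String) :=
  (PySem.Dict.ofList chrom_size).items.foldl (fun result p =>
    if p.2 ≤ max_chrom_size then
      result ++ [(p.1, 0, p.2, p.1)]
    else
      let splits := (PySem.Dict.ofList n_regions).getD p.1 []
      let st := pvALoop p.1 p.2 max_chrom_size splits 0 splits (result, 0, 1)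
      if st.2.1 < p.2 then st.1 ++ [(p.1, st.2.1, p.2, pvName p.1 st.2.2)] else st.1) []

-- ===== PORT B =====
-- candidate-tracking scan: state carries (result, start_pos, counter) and the optional candidate
def pvBLoop (chrom : String) (max_chrom_size : Int) :
    List (Int × Int) →
    (List (String × Int × Int × String) × Int × Int) × Option (Int × Int) →
    (List (String × Int × Int × String) × Int × Int) × Option (Int × Int)
  | [], r => r
  | split :: rest, (st, cand) =>
      if split.1 - st.2.1 > max_chrom_size then
        match cand with
        | some c =>
            let st' := (st.1 ++ [(chrom, st.2.1, c.1, pvName chrom st.2.2)], c.2, st.2.2 + 1)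
            pvBLoop chrom max_chrom_size rest
              (st', if split.1 - st'.2.1 ≤ max_chrom_size then some split else none)
        | none => pvBLoop chrom max_chrom_size rest (st, none)
      else
        pvBLoop chrom max_chrom_size rest (st, some split)

def create_genome_split_position_alt (chrom_size : List (String × Int)) (n_regions : List (String × List (Int × Int))) (max_chrom_size : Int) : List (String × Int × Int × String) :=
  (PySem.Dict.ofList chrom_size).items.foldl (fun result p =>
    if p.2 ≤ max_chrom_size then
      result ++ [(p.1, 0, p.2, p.1)]
    else
      let r := pvBLoop p.1 max_chrom_size ((PySem.Dict.ofList n_regions).getD p.1 []) ((result, 0, 1), none)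
      let st :=
        match r.2 with
        | some c =>
            if p.2 - r.1.2.1 > max_chrom_size then
              (r.1.1 ++ [(p.1, r.1.2.1, c.1, pvName p.1 r.1.2.2)], c.2, r.1.2.2 + 1)
            else r.1
        | none => r.1
      if st.2.1 < p.2 then st.1 ++ [(p.1, st.2.1, p.2, pvName p.1 st.2.2)] else st.1) []

-- ===== PRECONDITION & SPEC =====
def Spec_create_genome_split_position (chrom_size : List (String × Int)) (n_regions : List (String × List (Int × Int))) (max_chrom_size : Int) (out : List (String × Int × Int × String)) : Prop := out = create_genome_split_position_alt chrom_size n_regions max_chrom_size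
instance (chrom_size : List (String × Int)) (n_regions : List (String × List (Int × Int))) (max_chrom_size : Int) (out : List (String × Int × Int × String)) : Decidable (Spec_create_genome_split_position chrom_size n_regions max_chrom_size out) := by unfold Spec_create_genome_split_position; infer_instance

-- ===== CLAIM (what is proved, stated in full; the proofs are below) =====
def Claim_equal_create_genome_split_position : Prop := ∀ (chrom_size : List (String × Int)) (n_regions : List (String × List (Int × Int))) (max_chrom_size : Int), Dom_create_genome_split_position chrom_size n_regions max_chrom_size → Spec_create_genome_split_position chrom_size n_regions max_chrom_size (create_genome_split_position chrom_size n_regions max_chrom_size)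

-- ===== LEMMAS AND PROOFS =====

-- the shared tail 'if start_pos < size: append last region'
def pvAfter (chrom : String) (size : Int) (st : List (String × Int × Int × String) × Int × Int) : List (String × Int × Int × String) :=
  if st.2.1 < size then st.1 ++ [(chrom, st.2.1, size, pvName chrom st.2.2)] else st.1

-- B's post-loop processing (candidate commit, then the tail)
def pvBPost (chrom : String) (size max_chrom_size : Int) (r : (List (String × Int × Int × String) × Int × Int) × Option (Int × Int)) : List (String × Int × Int × String) :=
  match r.2 with
  | some c =>
      if size - r.1.2.1 > max_chrom_size then
        pvAfter chrom size (r.1.1 ++ [(chrom, r.1.2.1, c.1, pvName chrom r.1.2.2)], c.2, r.1.2.2 + 1)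
      else pvAfter chrom size r.1
  | none => pvAfter chrom size r.1

theorem pvSim (chrom : String) (size M : Int) :
    ∀ (suf : List (Int × Int)),
      (∀ (pre : List (Int × Int)) st,
        pvAfter chrom size (pvALoop chrom size M (pre ++ suf) pre.length suf st)
          = pvBPost chrom size M (pvBLoop chrom M suf (st, none))) ∧
      (∀ (pre : List (Int × Int)) st (c : Int × Int), c.1 - st.2.1 ≤ M →
        pvAfter chrom size (pvALoop chrom size M (pre ++ c :: suf) pre.length (c :: suf) st)
          = pvBPost chrom size M (pvBLoop chrom M suf (st, some c))) := by
  intro suf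
  induction suf with
  | nil =>
    constructor
    · intro pre st
      simp [pvALoop, pvBLoop, pvBPost]
    · intro pre st c hc
      have hlen : ((pre.length : Int) + 1 = PySem.List.len (pre ++ [c])) := by
        simp [PySem.List.len_eq]
      simp only [pvALoop, pvBLoop, hlen, if_pos]
      by_cases h2 : size - st.2.1 > M
      · rw [if_pos ⟨hc, h2⟩]
        simp only [pvBPost]
        rw [if_pos h2]
      · rw [if_neg (by rintro ⟨_, hx⟩; exact h2 hx)]
        simp only [pvBPost]
        rw [if_neg h2]
  | cons split suf' ih =>
    obtain ⟨ihn, ihs⟩ := ih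
    constructor
    · intro pre st
      by_cases h : split.1 - st.2.1 ≤ M
      · have hB : pvBLoop chrom M (split :: suf') (st, none)
            = pvBLoop chrom M suf' (st, some split) := by
          simp only [pvBLoop]
          rw [if_neg (by omega)]
        rw [hB]
        exact ihs pre st split h
      · have hA : pvALoop chrom size M (pre ++ split :: suf') pre.length (split :: suf') st
            = pvALoop chrom size M (pre ++ split :: suf') (pre.length + 1) suf' st := by
          simp only [pvALoop]
          rw [if_neg (by rintro ⟨h1, _⟩; exact h h1)]
        have hB : pvBLoop chrom M (split :: suf') (st, none)
            = pvBLoop chrom M suf' (st, none) := by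
          simp only [pvBLoop]
          rw [if_pos (by omega)]
        rw [hA, hB]
        have := ihn (pre ++ [split]) st
        simpa using this
    · intro pre st c hc
      have hne : ¬ ((pre.length : Int) + 1 = PySem.List.len (pre ++ c :: split :: suf')) := by
        simp [PySem.List.len_eq]; omega
      have hget : PySem.List.pyGetD (pre ++ c :: split :: suf') ((pre.length : Int) + 1) (0,0) = split := by
        have h : ((pre.length : Int) + 1) = ((pre.length + 1 : Nat) : Int) := by push_cast; ring
        rw [h, PySem.List.pyGetD_natCast]
        simp [List.getD_eq_getElem?_getD]
      by_cases h : split.1 - st.2.1 > M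
      · -- A cuts at c; B commits the candidate
        have hA : pvALoop chrom size M (pre ++ c :: split :: suf') pre.length (c :: split :: suf') st
            = pvALoop chrom size M (pre ++ c :: split :: suf') (pre.length + 1) (split :: suf')
                (st.1 ++ [(chrom, st.2.1, c.1, pvName chrom st.2.2)], c.2, st.2.2 + 1) := by
          simp only [pvALoop, hne, if_false, hget]
          rw [if_pos ⟨hc, h⟩]
        have hB : pvBLoop chrom M (split :: suf') (st, some c)
            = pvBLoop chrom M suf'
                ((st.1 ++ [(chrom, st.2.1, c.1, pvName chrom st.2.2)], c.2, st.2.2 + 1),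
                 if split.1 - c.2 ≤ M then some split else none) := by
          simp only [pvBLoop]
          rw [if_pos h]
        rw [hA, hB]
        set st' : List (String × Int × Int × String) × Int × Int :=
          (st.1 ++ [(chrom, st.2.1, c.1, pvName chrom st.2.2)], c.2, st.2.2 + 1) with hst'
        by_cases h2 : split.1 - c.2 ≤ M
        · rw [if_pos h2]
          have := ihs (pre ++ [c]) st' split (by rw [hst']; exact h2)
          simpa using this
        · rw [if_neg h2]
          have hA2 : pvALoop chrom size M (pre ++ c :: split :: suf') (pre.length + 1) (split :: suf') st'
              = pvALoop chrom size M (pre ++ c :: split :: suf') (pre.length + 2) suf' st' := by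
            simp only [pvALoop]
            rw [if_neg (by rintro ⟨h1, _⟩; exact h2 (by simpa [hst'] using h1))]
          rw [hA2]
          have := ihn (pre ++ [c, split]) st'
          simpa using this
      · -- next gap still fits: A does not cut; B overwrites the candidate
        have hA : pvALoop chrom size M (pre ++ c :: split :: suf') pre.length (c :: split :: suf') st
            = pvALoop chrom size M (pre ++ c :: split :: suf') (pre.length + 1) (split :: suf') st := by
          simp only [pvALoop, hne, if_false, hget]
          rw [if_neg (by rintro ⟨_, hx⟩; exact h hx)]
        have hB : pvBLoop chrom M (split :: suf') (st, some c)
            = pvBLoop chrom M suf' (st, some split) := by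
          simp only [pvBLoop]
          rw [if_neg h]
        rw [hA, hB]
        have := ihs (pre ++ [c]) st split (by omega)
        simpa using this

theorem create_genome_split_position_spec' :
    ∀ chrom_size n_regions max_chrom_size,
      create_genome_split_position chrom_size n_regions max_chrom_size
        = create_genome_split_position_alt chrom_size n_regions max_chrom_size := by
  intro cs nr M
  unfold create_genome_split_position create_genome_split_position_alt
  have hbody : ∀ (result : List (String × Int × Int × String)) (p : String × Int),
      (if p.2 ≤ M then result ++ [(p.1, 0, p.2, p.1)]
       else
        let splits := (PySem.Dict.ofList nr).getD p.1 []
        let st := pvALoop p.1 p.2 M splits 0 splits (result, 0, 1)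
        if st.2.1 < p.2 then st.1 ++ [(p.1, st.2.1, p.2, pvName p.1 st.2.2)] else st.1)
      = (if p.2 ≤ M then result ++ [(p.1, 0, p.2, p.1)]
       else
        let r := pvBLoop p.1 M ((PySem.Dict.ofList nr).getD p.1 []) ((result, 0, 1), none)
        let st :=
          match r.2 with
          | some c =>
              if p.2 - r.1.2.1 > M then
                (r.1.1 ++ [(p.1, r.1.2.1, c.1, pvName p.1 r.1.2.2)], c.2, r.1.2.2 + 1)
              else r.1
          | none => r.1
        if st.2.1 < p.2 then st.1 ++ [(p.1, st.2.1, p.2, pvName p.1 st.2.2)] else st.1) := by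
    intro result p
    by_cases hsz : p.2 ≤ M
    · simp [hsz]
    · simp only [if_neg hsz]
      have key := (pvSim p.1 p.2 M ((PySem.Dict.ofList nr).getD p.1 [])).1 [] (result, 0, 1)
      simp only [List.nil_append, List.length_nil] at key
      refine Eq.trans key ?_
      unfold pvBPost pvAfter
      rcases hr : (pvBLoop p.1 M ((PySem.Dict.ofList nr).getD p.1 []) ((result, 0, 1), none)).2 with _ | c
      · rfl
      · by_cases hC : p.2 - (pvBLoop p.1 M ((PySem.Dict.ofList nr).getD p.1 []) ((result, 0, 1), none)).1.2.1 > M <;>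
          simp [hC]
  have hfun : (fun (result : List (String × Int × Int × String)) (p : String × Int) =>
      if p.2 ≤ M then result ++ [(p.1, 0, p.2, p.1)]
      else
        let splits := (PySem.Dict.ofList nr).getD p.1 []
        let st := pvALoop p.1 p.2 M splits 0 splits (result, 0, 1)
        if st.2.1 < p.2 then st.1 ++ [(p.1, st.2.1, p.2, pvName p.1 st.2.2)] else st.1)
      = (fun (result : List (String × Int × Int × String)) (p : String × Int) =>
      if p.2 ≤ M then result ++ [(p.1, 0, p.2, p.1)]
      else
        let r := pvBLoop p.1 M ((PySem.Dict.ofList nr).getD p.1 []) ((result, 0, 1), none)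
        let st :=
          match r.2 with
          | some c =>
              if p.2 - r.1.2.1 > M then
                (r.1.1 ++ [(p.1, r.1.2.1, c.1, pvName p.1 r.1.2.2)], c.2, r.1.2.2 + 1)
              else r.1
          | none => r.1
        if st.2.1 < p.2 then st.1 ++ [(p.1, st.2.1, p.2, pvName p.1 st.2.2)] else st.1) := by
    funext result p
    exact hbody result p
  rw [hfun]

-- ===== VERDICT (by name: the statement is the Claim_ definition above) =====
theorem create_genome_split_position_spec : Claim_equal_create_genome_split_position := by
  intro cs nr m _
  exact create_genome_split_position_spec' cs nr m
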